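-- pv_equiv track=rewrite | github.com/Universe-Liu/Python | Algorithm/0418_getxorsum.py | getXORSum
-- ===== SOURCE A (Python) =====
-- def getXORSum(arr1, arr2):
--     andl=[]
--     for i in range(len(arr1)):
--         x=arr1[i]
--         for j in range(len(arr2)):
--             y=arr2[j]
--             andl.append(x&y)
--
--     if len(andl)==1:
--         return andl[0]
--     else:
--         res=andl[0]
--         for i in range(1,len(andl)):
--             res=res^andl[i]
--     return res
-- ===== SOURCE B (Python) =====
-- def getXORSum(arr1, arr2):
--     x1 = 0
--     for v in arr1:
--         x1 ^= v
--     x2 = 0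
--     for v in arr2:
--         x2 ^= v
--     return x1 & x2
-- ===== Notes on version B (the rewrite author's own statement) =====
-- stated objective: faster
-- what changed: Replaces the O(n*m) construction of all pairwise AND products followed by an XOR pass with two single XOR folds combined by one AND, using the identity XOR_{i,j}(x_i & y_j) = (XOR x_i) & (XOR y_j).
-- crash fix: A raises IndexError (andl[0] on an empty product list) whenever arr1 or arr2 is empty; B returns 0 there, the XOR-AND of empty folds. — e.g. on getXORSum([], [7]): A raises IndexError, B returns 0
import Mathlib
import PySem

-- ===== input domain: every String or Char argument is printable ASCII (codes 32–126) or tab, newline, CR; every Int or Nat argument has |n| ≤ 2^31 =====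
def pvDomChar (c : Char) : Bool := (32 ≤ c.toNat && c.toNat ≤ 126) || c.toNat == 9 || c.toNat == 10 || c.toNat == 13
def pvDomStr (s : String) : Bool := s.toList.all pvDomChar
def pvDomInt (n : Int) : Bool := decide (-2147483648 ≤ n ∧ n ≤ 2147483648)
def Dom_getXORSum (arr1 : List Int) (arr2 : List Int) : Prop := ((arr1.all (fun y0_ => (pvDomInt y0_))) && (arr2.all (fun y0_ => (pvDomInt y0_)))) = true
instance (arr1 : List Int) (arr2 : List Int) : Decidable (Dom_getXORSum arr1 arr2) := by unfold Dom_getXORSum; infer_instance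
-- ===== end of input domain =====

-- B replaces A's O(n*m) pass over all pairwise ANDs by two linear XOR folds
-- combined with one AND ((XOR arr1) & (XOR arr2)); asymptotically faster.

-- ===== PORT A =====
def getXORSum (arr1 : List Int) (arr2 : List Int) : Int :=
  -- andl = []; for i in range(len(arr1)): x=arr1[i]; for j ...: andl.append(x&y)
  let andl := arr1.foldl (fun acc x =>
    arr2.foldl (fun acc2 y => acc2 ++ [PySem.Int.band x y]) acc) []
  if andl.length = 1 then
    PySem.List.pyGetD andl 0 0      -- andl[0]; in range here since len(andl)=1
  else
    -- res = andl[0]  -- IndexError when andl = [] (arr1 or arr2 empty); excluded by Pre_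
    let res := PySem.List.pyGetD andl 0 0
    (PySem.List.pyRange 1 (andl.length : Int)).foldl
      (fun r i => PySem.Int.bxor r (PySem.List.pyGetD andl i 0)) res

-- ===== PORT B =====
def getXORSum_alt (arr1 : List Int) (arr2 : List Int) : Int :=
  let x1 := arr1.foldl (fun x1 v => PySem.Int.bxor x1 v) 0
  let x2 := arr2.foldl (fun x2 v => PySem.Int.bxor x2 v) 0
  PySem.Int.band x1 x2

-- ===== PRECONDITION & SPEC =====
-- A evaluates andl[0]; when arr1 or arr2 is empty the pairwise list is empty and
-- Python raises IndexError, so those inputs are excluded.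
def Pre_getXORSum (arr1 : List Int) (arr2 : List Int) : Prop := arr1 ≠ [] ∧ arr2 ≠ []
instance (arr1 : List Int) (arr2 : List Int) : Decidable (Pre_getXORSum arr1 arr2) := by unfold Pre_getXORSum; infer_instance
def pvWitness_getXORSum : List Int × List Int := ([3, -5], [6])

-- A raises IndexError (andl[0] on the empty pairwise list) whenever arr1 or arr2 is empty; B returns 0 there.
def Raises_getXORSum (arr1 : List Int) (arr2 : List Int) : Prop := arr1 = [] ∨ arr2 = []
instance (arr1 : List Int) (arr2 : List Int) : Decidable (Raises_getXORSum arr1 arr2) := by unfold Raises_getXORSum; infer_instance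
def pvRaiseWitness_getXORSum : List Int × List Int := ([], [7])
def pvRaiseWitnessOut_getXORSum : Int := 0

def Spec_getXORSum (arr1 : List Int) (arr2 : List Int) (out : Int) : Prop := out = getXORSum_alt arr1 arr2
instance (arr1 : List Int) (arr2 : List Int) (out : Int) : Decidable (Spec_getXORSum arr1 arr2 out) := by unfold Spec_getXORSum; infer_instance

-- ===== CLAIM (what is proved, stated in full; the proofs are below) =====
def Claim_equal_getXORSum : Prop := ∀ (arr1 : List Int) (arr2 : List Int), Dom_getXORSum arr1 arr2 → Pre_getXORSum arr1 arr2 → Spec_getXORSum arr1 arr2 (getXORSum arr1 arr2)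
def Claim_raises_getXORSum : Prop := (∀ (arr1 : List Int) (arr2 : List Int), Dom_getXORSum arr1 arr2 → Raises_getXORSum arr1 arr2 → ¬ Pre_getXORSum arr1 arr2) ∧ (Dom_getXORSum (pvRaiseWitness_getXORSum.1) (pvRaiseWitness_getXORSum.2) ∧ Raises_getXORSum (pvRaiseWitness_getXORSum.1) (pvRaiseWitness_getXORSum.2) ∧ getXORSum_alt (pvRaiseWitness_getXORSum.1) (pvRaiseWitness_getXORSum.2) = pvRaiseWitnessOut_getXORSum)

-- ===== LEMMAS AND PROOFS =====

-- ## Bit-level infrastructure: PySem.Int.band/bxor agree with Mathlib's Int.land/Int.xor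

theorem pv_ldiff_div_two (m n : Nat) : Nat.ldiff m n / 2 = Nat.ldiff (m/2) (n/2) := by
  apply Nat.eq_of_testBit_eq; intro i
  simp [Nat.testBit_div_two, Nat.testBit_ldiff]

theorem pv_ldiff_mod_two (m n : Nat) :
    Nat.ldiff m n % 2 = (if m % 2 = 1 ∧ ¬ (n % 2 = 1) then 1 else 0) := by
  have h1 : (Nat.ldiff m n).testBit 0 = (m.testBit 0 && !(n.testBit 0)) := Nat.testBit_ldiff m n 0
  simp only [Nat.testBit_zero] at h1
  rcases Nat.mod_two_eq_zero_or_one (Nat.ldiff m n) with h | h <;>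
    rcases Nat.mod_two_eq_zero_or_one m with hm | hm <;>
    rcases Nat.mod_two_eq_zero_or_one n with hn | hn <;>
    simp [h, hm, hn] at h1 ⊢

theorem pv_and_mod_two (m n : Nat) :
    (m &&& n) % 2 = (if m % 2 = 1 ∧ n % 2 = 1 then 1 else 0) := by
  have h1 : (m &&& n).testBit 0 = (m.testBit 0 && n.testBit 0) := Nat.testBit_and m n 0
  simp only [Nat.testBit_zero] at h1
  rcases Nat.mod_two_eq_zero_or_one (m &&& n) with h | h <;>
    rcases Nat.mod_two_eq_zero_or_one m with hm | hm <;>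
    rcases Nat.mod_two_eq_zero_or_one n with hn | hn <;>
    simp [h, hm, hn] at h1 ⊢

theorem pv_sub_and_eq_ldiff (m n : Nat) : m - (m &&& n) = Nat.ldiff m n := by
  induction m using Nat.strong_induction_on generalizing n with
  | _ m IH =>
    rcases Nat.eq_zero_or_pos m with h0 | hpos
    · subst h0
      simp only [Nat.zero_and, Nat.sub_zero]
      apply Nat.eq_of_testBit_eq
      intro i; simp [Nat.testBit_ldiff]
    · have hlt : m / 2 < m := Nat.div_lt_self hpos (by norm_num)
      have ih := IH (m/2) hlt (n/2)
      have hand_div : (m &&& n) / 2 = m/2 &&& n/2 := Nat.and_div_two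
      have hld_div : Nat.ldiff m n / 2 = Nat.ldiff (m/2) (n/2) := pv_ldiff_div_two m n
      have hand_le : m/2 &&& n/2 ≤ m/2 := Nat.and_le_left
      have h1 := pv_and_mod_two m n
      have h2 := pv_ldiff_mod_two m n
      split_ifs at h1 h2 <;> omega

theorem pv_band_eq_land (a b : Int) : PySem.Int.band a b = Int.land a b := by
  cases a with
  | ofNat m => cases b with
    | ofNat n => simp [PySem.Int.band, Int.land]
    | negSucc n =>
        simp [PySem.Int.band, Int.land, Int.negSucc_eq,
              show ¬((n:Int) ≤ -1) from by omega]
        exact pv_sub_and_eq_ldiff m n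
  | negSucc m => cases b with
    | ofNat n =>
        simp [PySem.Int.band, Int.land, Int.negSucc_eq,
              show ¬((m:Int) ≤ -1) from by omega]
        exact pv_sub_and_eq_ldiff n m
    | negSucc n =>
        simp [PySem.Int.band, Int.land, Int.negSucc_eq,
              show ¬((m:Int) ≤ -1) from by omega, show ¬((n:Int) ≤ -1) from by omega]
        ring

theorem pv_bxor_eq_xor (a b : Int) : PySem.Int.bxor a b = Int.xor a b := by
  cases a with
  | ofNat m => cases b with
    | ofNat n => simp [PySem.Int.bxor, Int.xor]
    | negSucc n =>
        simp [PySem.Int.bxor, Int.xor, Int.negSucc_eq,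
              show ¬((n:Int) ≤ -1) from by omega]
        ring
  | negSucc m => cases b with
    | ofNat n =>
        simp [PySem.Int.bxor, Int.xor, Int.negSucc_eq,
              show ¬((m:Int) ≤ -1) from by omega]
        ring
    | negSucc n =>
        simp [PySem.Int.bxor, Int.xor, Int.negSucc_eq,
              show ¬((m:Int) ≤ -1) from by omega, show ¬((n:Int) ≤ -1) from by omega]

theorem pv_int_eq_of_testBit_eq {a b : Int} (h : ∀ i, a.testBit i = b.testBit i) : a = b := by
  cases a with
  | ofNat m => cases b with
    | ofNat n =>
        have : m = n := Nat.eq_of_testBit_eq fun i => by simpa [Int.testBit] using h i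
        simp [this]
    | negSucc n =>
        exfalso
        have hi := h (2 ^ (m + n))
        have hm : m.testBit (2 ^ (m + n)) = false :=
          Nat.testBit_lt_two_pow (lt_of_lt_of_le Nat.lt_two_pow_self
            (Nat.pow_le_pow_right (by norm_num) (by calc m ≤ m + n := Nat.le_add_right m n
                                                       _ ≤ 2 ^ (m+n) := Nat.le_of_lt Nat.lt_two_pow_self)))
        have hn : n.testBit (2 ^ (m + n)) = false :=
          Nat.testBit_lt_two_pow (lt_of_lt_of_le Nat.lt_two_pow_self
            (Nat.pow_le_pow_right (by norm_num) (by calc n ≤ m + n := Nat.le_add_left n m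
                                                       _ ≤ 2 ^ (m+n) := Nat.le_of_lt Nat.lt_two_pow_self)))
        simp [Int.testBit, hm, hn] at hi
  | negSucc m => cases b with
    | ofNat n =>
        exfalso
        have hi := h (2 ^ (m + n))
        have hm : m.testBit (2 ^ (m + n)) = false :=
          Nat.testBit_lt_two_pow (lt_of_lt_of_le Nat.lt_two_pow_self
            (Nat.pow_le_pow_right (by norm_num) (by calc m ≤ m + n := Nat.le_add_right m n
                                                       _ ≤ 2 ^ (m+n) := Nat.le_of_lt Nat.lt_two_pow_self)))
        have hn : n.testBit (2 ^ (m + n)) = false :=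
          Nat.testBit_lt_two_pow (lt_of_lt_of_le Nat.lt_two_pow_self
            (Nat.pow_le_pow_right (by norm_num) (by calc n ≤ m + n := Nat.le_add_left n m
                                                       _ ≤ 2 ^ (m+n) := Nat.le_of_lt Nat.lt_two_pow_self)))
        simp [Int.testBit, hm, hn] at hi
    | negSucc n =>
        have : m = n := Nat.eq_of_testBit_eq fun i => by
          have := h i; simpa [Int.testBit] using this
        simp [this]

-- ## Algebra of band/bxor

theorem pv_bxor_assoc (a b c : Int) :
    PySem.Int.bxor (PySem.Int.bxor a b) c = PySem.Int.bxor a (PySem.Int.bxor b c) := by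
  simp only [pv_bxor_eq_xor]
  apply pv_int_eq_of_testBit_eq; intro i
  simp [Int.testBit_lxor]

theorem pv_band_bxor_distrib_left (a b c : Int) :
    PySem.Int.band a (PySem.Int.bxor b c) =
      PySem.Int.bxor (PySem.Int.band a b) (PySem.Int.band a c) := by
  simp only [pv_bxor_eq_xor, pv_band_eq_land]
  apply pv_int_eq_of_testBit_eq; intro i
  simp [Int.testBit_lxor, Int.testBit_land, Bool.and_xor_distrib_left]

theorem pv_band_bxor_distrib_right (a b c : Int) :
    PySem.Int.band (PySem.Int.bxor a b) c =
      PySem.Int.bxor (PySem.Int.band a c) (PySem.Int.band b c) := by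
  rw [PySem.Int.band_comm, pv_band_bxor_distrib_left,
      PySem.Int.band_comm c a, PySem.Int.band_comm c b]

theorem pv_zero_bxor (a : Int) : PySem.Int.bxor 0 a = a := by
  rw [PySem.Int.bxor_comm]; exact PySem.Int.bxor_zero a

theorem pv_zero_band (a : Int) : PySem.Int.band 0 a = 0 := by
  rw [PySem.Int.band_comm]; exact PySem.Int.band_zero a

-- ## XOR folds

theorem pv_foldl_bxor_init (l : List Int) (i j : Int) :
    l.foldl PySem.Int.bxor (PySem.Int.bxor i j) = PySem.Int.bxor i (l.foldl PySem.Int.bxor j) := by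
  induction l generalizing j with
  | nil => rfl
  | cons h t ih =>
      simp only [List.foldl_cons, pv_bxor_assoc]
      exact ih (PySem.Int.bxor j h)

theorem pv_foldl_bxor_eq (l : List Int) (i : Int) :
    l.foldl PySem.Int.bxor i = PySem.Int.bxor i (l.foldl PySem.Int.bxor 0) := by
  have := pv_foldl_bxor_init l i 0
  rwa [PySem.Int.bxor_zero] at this

theorem pv_xfold_append (l1 l2 : List Int) :
    (l1 ++ l2).foldl PySem.Int.bxor 0 =
      PySem.Int.bxor (l1.foldl PySem.Int.bxor 0) (l2.foldl PySem.Int.bxor 0) := by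
  rw [List.foldl_append, pv_foldl_bxor_eq]

theorem pv_xfold_map_band (x : Int) (l : List Int) :
    (l.map (fun y => PySem.Int.band x y)).foldl PySem.Int.bxor 0 =
      PySem.Int.band x (l.foldl PySem.Int.bxor 0) := by
  induction l with
  | nil => simp [PySem.Int.band_zero]
  | cons h t ih =>
      simp only [List.map_cons, List.foldl_cons]
      rw [pv_foldl_bxor_eq _ (PySem.Int.bxor 0 (PySem.Int.band x h)), ih,
          pv_foldl_bxor_eq t (PySem.Int.bxor 0 h), pv_zero_bxor, pv_zero_bxor,
          ← pv_band_bxor_distrib_left]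

theorem pv_xfold_flatMap (arr1 arr2 : List Int) :
    (arr1.flatMap (fun x => arr2.map (fun y => PySem.Int.band x y))).foldl PySem.Int.bxor 0 =
      PySem.Int.band (arr1.foldl PySem.Int.bxor 0) (arr2.foldl PySem.Int.bxor 0) := by
  induction arr1 with
  | nil => simp [pv_zero_band]
  | cons h t ih =>
      rw [List.flatMap_cons, pv_xfold_append, pv_xfold_map_band, ih, List.foldl_cons,
          pv_foldl_bxor_eq t (PySem.Int.bxor 0 h), pv_zero_bxor, pv_band_bxor_distrib_right]

-- ## A's accumulator is the flat list of pairwise ANDs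

theorem pv_andl_eq (arr1 arr2 : List Int) (acc : List Int) :
    arr1.foldl (fun acc x =>
        arr2.foldl (fun acc2 y => acc2 ++ [PySem.Int.band x y]) acc) acc =
      acc ++ arr1.flatMap (fun x => arr2.map (fun y => PySem.Int.band x y)) := by
  induction arr1 generalizing acc with
  | nil => simp
  | cons h t ih =>
    rw [List.foldl_cons, ih, PySem.List.foldl_append_singleton_eq_map, List.flatMap_cons,
        List.append_assoc]

-- ## A's xor pass equals the fold from 0

theorem pv_A_eq_xfold (andl : List Int) (hne : andl ≠ []) :
    (if andl.length = 1 then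
      PySem.List.pyGetD andl 0 0
    else
      (PySem.List.pyRange 1 (andl.length : Int)).foldl
        (fun r i => PySem.Int.bxor r (PySem.List.pyGetD andl i 0))
        (PySem.List.pyGetD andl 0 0)) = andl.foldl PySem.Int.bxor 0 := by
  obtain ⟨h, t, rfl⟩ : ∃ h t, andl = h :: t := by
    cases andl with
    | nil => exact absurd rfl hne
    | cons h t => exact ⟨h, t, rfl⟩
  have hget0 : PySem.List.pyGetD (h :: t) 0 0 = h := by
    simp [PySem.List.pyGetD, PySem.List.pyGet?, PySem.List.pyIdx?]
  split_ifs with hlen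
  · have : t = [] := by
      simpa using List.length_eq_zero_iff.mp (by simpa using hlen)
    subst this
    simp [hget0, pv_zero_bxor]
  · rw [PySem.List.foldl_pyRange_pyGetD' (h :: t) 0 PySem.Int.bxor
        (PySem.List.pyGetD (h :: t) 0 0) (by norm_num : (0:Int) ≤ 1)]
    simp [hget0, pv_zero_bxor]

-- ===== VERDICT (by name: the statement is the Claim_ definition above) =====
theorem getXORSum_spec : Claim_equal_getXORSum := by
  intro arr1 arr2 _hdom hpre
  unfold Spec_getXORSum getXORSum getXORSum_alt
  rw [pv_andl_eq arr1 arr2 []]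
  have hne : arr1.flatMap (fun x => arr2.map (fun y => PySem.Int.band x y)) ≠ [] := by
    obtain ⟨h1, h2⟩ := hpre
    cases arr1 with
    | nil => exact absurd rfl h1
    | cons a t =>
        cases arr2 with
        | nil => exact absurd rfl h2
        | cons b u => simp
  simp only [List.nil_append]
  rw [pv_A_eq_xfold _ hne, pv_xfold_flatMap]

def getXORSum_raises : Claim_raises_getXORSum := by
  unfold Claim_raises_getXORSum
  constructor
  · intro arr1 arr2 _hdom hr hpre
    unfold Raises_getXORSum at hr
    unfold Pre_getXORSum at hpre
    rcases hr with h | h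
    · exact hpre.1 h
    · exact hpre.2 h
  · exact ⟨by decide, by decide, by decide⟩
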